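-- pv_equiv track=rewrite | github.com/Y108/Sequences | theta/sequence_generators.py | IV_Thue_Morse
-- ===== SOURCE A (Python) =====
-- def IV_Thue_Morse(n):
--     K = [4]
--     for j in range(n):
--         K = [int(i) for i in ''.join(
--             str(4123) if x == 4 else
--             str(3412) if x == 3 else
--             str(2341) if x == 2 else
--             str(1234) if x == 1 else
--             str(x) for x in K)]
--     return K
-- ===== SOURCE B (Python) =====
-- def IV_Thue_Morse(n):
--     # Closed form: after n substitutions, the symbol at position i is the
--     # base-4 digit sum of i modulo 4, with residue 0 written as 4.
--     if n < 1:
--         return [4]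
--     out = []
--     for i in range(4 ** n):
--         s = 0
--         j = i
--         while j:
--             s += j & 3
--             j >>= 2
--         r = s & 3
--         out.append(4 if r == 0 else r)
--     return out
-- ===== Notes on version B (the rewrite author's own statement) =====
-- stated objective: alternative
-- what changed: Replaces the repeated rewrite-the-whole-string-and-reparse substitution loop by the closed form: the symbol at position i of the n-th iterate is the base-4 digit sum of i modulo 4 (residue 0 written as symbol 4), computed directly in one pass over range(4**n).
import Mathlib
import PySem

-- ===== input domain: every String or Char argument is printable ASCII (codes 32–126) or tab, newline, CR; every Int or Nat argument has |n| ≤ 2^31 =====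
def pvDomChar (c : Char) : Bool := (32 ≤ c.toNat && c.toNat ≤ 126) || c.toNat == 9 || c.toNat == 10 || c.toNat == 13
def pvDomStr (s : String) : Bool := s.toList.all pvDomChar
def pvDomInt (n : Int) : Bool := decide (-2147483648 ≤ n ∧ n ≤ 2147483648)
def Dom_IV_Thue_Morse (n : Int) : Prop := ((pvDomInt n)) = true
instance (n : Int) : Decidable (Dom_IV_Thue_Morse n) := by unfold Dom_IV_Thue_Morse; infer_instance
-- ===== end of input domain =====

-- B replaces A's repeated string-substitution loop by the closed form
-- "position i holds (base-4 digit sum of i) mod 4, with 0 written as 4",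
-- computed directly in one pass (objective: alternative algorithm).


-- ===== PORT A =====
-- str(4123) if x == 4 else str(3412) if x == 3 else str(2341) if x == 2 else str(1234) if x == 1 else str(x)
def symStr (x : Int) : String :=
  if x == 4 then PySem.Int.toStr 4123
  else if x == 3 then PySem.Int.toStr 3412
  else if x == 2 then PySem.Int.toStr 2341
  else if x == 1 then PySem.Int.toStr 1234
  else PySem.Int.toStr x

-- int(i) for a single character i; in A every joined character is a digit, so
-- ofStr? is always `some` and the `.getD 0` default is never taken.
def chr2int (c : Char) : Int := (PySem.Int.ofStr? (String.ofList [c])).getD 0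

-- K = [int(i) for i in ''.join(... for x in K)]
def stepA (K : List Int) : List Int :=
  ((PySem.Str.join "" (K.map symStr)).toList).map chr2int

def IV_Thue_Morse (n : Int) : List Int :=
  (PySem.List.pyRange 0 n 1).foldl (fun K _ => stepA K) [4]

-- ===== PORT B =====
-- the `while j:` digit-sum loop of Source B, with fuel i (enough: j decreases below its start)
def dsAux : Nat → Nat → Nat
  | 0, _ => 0
  | fuel + 1, j => if j = 0 then 0 else j % 4 + dsAux fuel (j / 4)

def digitSum4 (i : Nat) : Nat := dsAux i i

def IV_Thue_Morse_alt (n : Int) : List Int :=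
  if n < 1 then [4]
  else (List.range (4 ^ n.toNat)).map (fun i =>
    let r := digitSum4 i % 4
    if r = 0 then 4 else (r : Int))

-- ===== PRECONDITION & SPEC =====
def Spec_IV_Thue_Morse (n : Int) (out : List Int) : Prop := out = IV_Thue_Morse_alt n
instance (n : Int) (out : List Int) : Decidable (Spec_IV_Thue_Morse n out) := by unfold Spec_IV_Thue_Morse; infer_instance

-- ===== CLAIM (what is proved, stated in full; the proofs are below) =====
def Claim_equal_IV_Thue_Morse : Prop := ∀ (n : Int), Dom_IV_Thue_Morse n → Spec_IV_Thue_Morse n (IV_Thue_Morse n)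

-- ===== LEMMAS AND PROOFS =====

-- the symbol written at position i
def vr (s : Nat) : Int := if s % 4 = 0 then 4 else ((s % 4 : Nat) : Int)
def val (i : Nat) : Int := vr (digitSum4 i)

theorem dsAux_zero (f : Nat) : dsAux f 0 = 0 := by cases f <;> simp [dsAux]

theorem dsAux_congr : ∀ (f1 f2 j : Nat), j ≤ f1 → j ≤ f2 → dsAux f1 j = dsAux f2 j := by
  intro f1
  induction f1 with
  | zero =>
    intro f2 j h1 _
    have hj : j = 0 := by omega
    subst hj
    simp [dsAux_zero]
  | succ f ih =>
    intro f2 j h1 h2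
    cases f2 with
    | zero =>
      have hj : j = 0 := by omega
      subst hj
      simp [dsAux_zero]
    | succ g =>
      by_cases hj : j = 0
      · subst hj; simp [dsAux]
      · simp only [dsAux, if_neg hj]
        rw [ih g (j / 4) (by omega) (by omega)]

theorem digitSum4_zero : digitSum4 0 = 0 := by simp [digitSum4, dsAux]

theorem dsAux_eq_digitSum4 (f j : Nat) (h : j ≤ f) : dsAux f j = digitSum4 j :=
  dsAux_congr f j j h (le_refl j)

theorem digitSum4_step (i t : Nat) (ht : t < 4) : digitSum4 (4 * i + t) = t + digitSum4 i := by
  by_cases h0 : 4 * i + t = 0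
  · have hi : i = 0 := by omega
    have htt : t = 0 := by omega
    subst hi; subst htt; simp [digitSum4_zero]
  · rcases Nat.exists_eq_succ_of_ne_zero h0 with ⟨f, hf⟩
    have h1 : digitSum4 (4 * i + t) = dsAux (f + 1) (4 * i + t) := by
      unfold digitSum4; rw [hf]
    rw [h1]
    simp only [dsAux, if_neg h0]
    have hm : (4 * i + t) % 4 = t := by omega
    have hd : (4 * i + t) / 4 = i := by omega
    rw [hm, hd, dsAux_eq_digitSum4 f i (by omega)]

theorem join_empty_flatten (css : List (List Char)) :
    PySem.Chars.join [] css = css.flatten := by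
  induction css with
  | nil => simp [PySem.Chars.join_nil]
  | cons c t ih =>
    cases t with
    | nil => simp [PySem.Chars.join_singleton]
    | cons d t2 =>
      rw [PySem.Chars.join_cons_cons]
      simp only [List.flatten_cons] at *
      simp [ih]

theorem stepA_eq_flatMap (K : List Int) :
    stepA K = K.flatMap (fun x => ((symStr x).toList).map chr2int) := by
  unfold stepA
  rw [PySem.Str.toList_join]
  simp only [String.toList_empty]
  rw [join_empty_flatten]
  simp [List.flatMap_def, List.map_flatten, List.map_map, Function.comp_def]

theorem symStr_vr (s : Nat) :
    ((symStr (vr s)).toList).map chr2int = [vr s, vr (s + 1), vr (s + 2), vr (s + 3)] := by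
  have e4 : ((symStr 4).toList).map chr2int = [4, 1, 2, 3] := by decide
  have e1 : ((symStr 1).toList).map chr2int = [1, 2, 3, 4] := by decide
  have e2 : ((symStr 2).toList).map chr2int = [2, 3, 4, 1] := by decide
  have e3 : ((symStr 3).toList).map chr2int = [3, 4, 1, 2] := by decide
  rcases (by omega : s % 4 = 0 ∨ s % 4 = 1 ∨ s % 4 = 2 ∨ s % 4 = 3) with h | h | h | h
  · have h1 : (s + 1) % 4 = 1 := by omega
    have h2 : (s + 2) % 4 = 2 := by omega
    have h3 : (s + 3) % 4 = 3 := by omega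
    have hv : vr s = 4 := by simp [vr, h]
    rw [hv, e4]
    simp [vr, h1, h2, h3]
  · have h1 : (s + 1) % 4 = 2 := by omega
    have h2 : (s + 2) % 4 = 3 := by omega
    have h3 : (s + 3) % 4 = 0 := by omega
    have hv : vr s = 1 := by simp [vr, h]
    rw [hv, e1]
    simp [vr, h1, h2, h3]
  · have h1 : (s + 1) % 4 = 3 := by omega
    have h2 : (s + 2) % 4 = 0 := by omega
    have h3 : (s + 3) % 4 = 1 := by omega
    have hv : vr s = 2 := by simp [vr, h]
    rw [hv, e2]
    simp [vr, h1, h2, h3]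
  · have h1 : (s + 1) % 4 = 0 := by omega
    have h2 : (s + 2) % 4 = 1 := by omega
    have h3 : (s + 3) % 4 = 2 := by omega
    have hv : vr s = 3 := by simp [vr, h]
    rw [hv, e3]
    simp [vr, h1, h2, h3]

theorem expand_val (i : Nat) :
    ((symStr (val i)).toList).map chr2int
      = [val (4 * i), val (4 * i + 1), val (4 * i + 2), val (4 * i + 3)] := by
  have d0 : digitSum4 (4 * i) = digitSum4 i := by
    have := digitSum4_step i 0 (by omega); simpa using this
  have d1 : digitSum4 (4 * i + 1) = digitSum4 i + 1 := by
    have := digitSum4_step i 1 (by omega); omega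
  have d2 : digitSum4 (4 * i + 2) = digitSum4 i + 2 := by
    have := digitSum4_step i 2 (by omega); omega
  have d3 : digitSum4 (4 * i + 3) = digitSum4 i + 3 := by
    have := digitSum4_step i 3 (by omega); omega
  unfold val
  rw [d0, d1, d2, d3]
  exact symStr_vr (digitSum4 i)

theorem range_four (m : Nat) :
    List.range (4 * m) = (List.range m).flatMap (fun i => [4 * i, 4 * i + 1, 4 * i + 2, 4 * i + 3]) := by
  induction m with
  | zero => simp
  | succ m ih =>
    rw [show 4 * (m + 1) = (((4 * m + 1) + 1) + 1) + 1 by ring]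
    rw [List.range_succ, List.range_succ, List.range_succ, List.range_succ]
    rw [List.range_succ (n := m), List.flatMap_append, ← ih]
    simp

theorem stepA_map_val (m : Nat) :
    stepA ((List.range m).map val) = (List.range (4 * m)).map val := by
  rw [stepA_eq_flatMap, List.flatMap_map, range_four, List.map_flatMap]
  apply List.flatMap_congr
  intro i _
  rw [expand_val i]
  simp

theorem iterate_stepA (k : Nat) :
    stepA^[k] [4] = (List.range (4 ^ k)).map val := by
  induction k with
  | zero =>
    simp [val, vr, digitSum4_zero]
  | succ k ih =>
    rw [Function.iterate_succ_apply', ih, stepA_map_val]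
    congr 1
    congr 1
    ring

theorem foldl_const_stepA (l : List Int) (init : List Int) :
    l.foldl (fun K _ => stepA K) init = stepA^[l.length] init := by
  induction l generalizing init with
  | nil => simp
  | cons x t ih => simp [ih, Function.iterate_succ_apply]

theorem alt_eq_map_val (n : Int) (h : ¬ n < 1) :
    IV_Thue_Morse_alt n = (List.range (4 ^ n.toNat)).map val := by
  unfold IV_Thue_Morse_alt
  rw [if_neg h]
  rfl

-- ===== VERDICT (by name: the statement is the Claim_ definition above) =====
theorem IV_Thue_Morse_spec : Claim_equal_IV_Thue_Morse := by
  intro n _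
  unfold Spec_IV_Thue_Morse IV_Thue_Morse
  by_cases h : n < 1
  · rw [PySem.List.pyRange_one_eq_nil (by omega)]
    simp [IV_Thue_Morse_alt, h]
  · rw [foldl_const_stepA, PySem.List.length_pyRange_one]
    rw [show (n - 0).toNat = n.toNat by omega]
    rw [iterate_stepA, alt_eq_map_val n h]
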